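-- pv_equiv track=rewrite | github.com/robwilde2009/rix.co.uk-credit-file | extractor.py | find_section_range
-- ===== SOURCE A (Python) =====
-- from typing import Any, Dict, List, Optional, Tuple
--
-- def find_section_range(lines: List[str], header_patterns: List[str], stop_patterns: List[str]) -> Tuple[int, int]:
--     start_idx = -1
--     end_idx = len(lines)
--
--     for i, line in enumerate(lines):
--         ll = line.lower()
--         if start_idx == -1 and any(p in ll for p in header_patterns):
--             start_idx = i
--             continue
--
--         if start_idx != -1 and any(p in ll for p in stop_patterns):
--             end_idx = i
--             break
--
--     if start_idx == -1:
--         return (0, len(lines))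
--
--     return (start_idx, end_idx)
-- ===== SOURCE B (Python) =====
-- def find_section_range(lines, header_patterns, stop_patterns):
--     # Precompute the index lists of ALL header-matching and stop-matching lines,
--     # then the answer is pure arithmetic on those index sets.
--     def hits(patterns):
--         return [i for i, line in enumerate(lines)
--                 if any(p in line.lower() for p in patterns)]
--     headers = hits(header_patterns)
--     if not headers:
--         return (0, len(lines))
--     start = headers[0]
--     end = min((j for j in hits(stop_patterns) if j > start), default=len(lines))
--     return (start, end)
-- ===== Notes on version B (the rewrite author's own statement) =====
-- stated objective: alternative
-- what changed: Instead of A's single-pass state machine with a start flag and break, B materialises the full index lists of all header-matching and all stop-matching lines and then selects start = first header index and end = min of the stop indices strictly after it (default len(lines)).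
import Mathlib
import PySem

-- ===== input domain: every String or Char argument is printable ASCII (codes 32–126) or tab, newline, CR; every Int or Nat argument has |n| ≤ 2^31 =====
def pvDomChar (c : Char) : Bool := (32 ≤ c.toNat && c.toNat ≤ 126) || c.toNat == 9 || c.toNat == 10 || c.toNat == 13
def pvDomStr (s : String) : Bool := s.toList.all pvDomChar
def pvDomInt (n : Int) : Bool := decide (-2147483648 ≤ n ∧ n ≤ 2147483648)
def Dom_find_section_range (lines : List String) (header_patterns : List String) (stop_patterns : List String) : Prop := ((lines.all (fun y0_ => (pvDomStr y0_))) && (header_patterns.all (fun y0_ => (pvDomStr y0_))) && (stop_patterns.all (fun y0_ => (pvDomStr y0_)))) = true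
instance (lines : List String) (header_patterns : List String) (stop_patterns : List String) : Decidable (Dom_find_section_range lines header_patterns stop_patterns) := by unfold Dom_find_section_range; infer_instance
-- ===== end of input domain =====

-- B replaces A's single-pass start/end state machine by materialising the index
-- lists of all header-matching and all stop-matching lines and selecting the
-- answer arithmetically (first header; min stop index after it); objective: alternative.

-- ===== PORT A =====
-- shared transliteration of the line test 'any(p in line.lower() for p in pats)'
-- (both Python versions spell this same expression):
def lineHits (pats : List String) (line : String) : Bool :=
  pats.any (fun p => PySem.Str.isIn p (PySem.Str.lower line))

-- A's for-loop with state (i, start_idx), breaking on a stop line; n = len(lines)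
-- carried so the default end_idx = len(lines) is available at loop exit.
def findSectionGoA (header_patterns stop_patterns : List String) (n : Int) :
    List String → Int → Int → Int × Int
  | [], _, start_idx => if start_idx == -1 then (0, n) else (start_idx, n)
  | line :: rest, i, start_idx =>
    if start_idx == -1 && lineHits header_patterns line then
      findSectionGoA header_patterns stop_patterns n rest (i + 1) i
    else if start_idx != -1 && lineHits stop_patterns line then
      (start_idx, i)  -- end_idx = i; break; start_idx ≠ -1 here so A returns (start_idx, i)
    else
      findSectionGoA header_patterns stop_patterns n rest (i + 1) start_idx

def find_section_range (lines : List String) (header_patterns : List String) (stop_patterns : List String) : Int × Int :=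
  findSectionGoA header_patterns stop_patterns (lines.length : Int) lines 0 (-1)

-- ===== PORT B =====
-- B's comprehension '[i for i, line in enumerate(lines) if any(p in line.lower() for p in patterns)]'
def hitIdxs (pats : List String) : List String → Int → List Int
  | [], _ => []
  | l :: rest, i =>
    if lineHits pats l then i :: hitIdxs pats rest (i + 1) else hitIdxs pats rest (i + 1)

def find_section_range_alt (lines : List String) (header_patterns : List String) (stop_patterns : List String) : Int × Int :=
  match hitIdxs header_patterns lines 0 with
  | [] => (0, (lines.length : Int))
  | s :: _ =>
    -- min((j for j in hits(stop_patterns) if j > start), default=len(lines))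
    let cand := (hitIdxs stop_patterns lines 0).filter (fun j => s < j)
    (s, match PySem.List.min? cand (fun x => x) with
        | none => (lines.length : Int)
        | some m => m)

-- ===== PRECONDITION & SPEC =====
def Spec_find_section_range (lines : List String) (header_patterns : List String) (stop_patterns : List String) (out : Int × Int) : Prop := out = find_section_range_alt lines header_patterns stop_patterns
instance (lines : List String) (header_patterns : List String) (stop_patterns : List String) (out : Int × Int) : Decidable (Spec_find_section_range lines header_patterns stop_patterns out) := by unfold Spec_find_section_range; infer_instance

-- ===== CLAIM (what is proved, stated in full; the proofs are below) =====
def Claim_equal_find_section_range : Prop := ∀ (lines : List String) (header_patterns : List String) (stop_patterns : List String), Dom_find_section_range lines header_patterns stop_patterns → Spec_find_section_range lines header_patterns stop_patterns (find_section_range lines header_patterns stop_patterns)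

-- ===== LEMMAS AND PROOFS =====

-- elements of hitIdxs lie in [i, i + length)
theorem hitIdxs_mem_bounds (p : List String) :
    ∀ (xs : List String) (i : Int) (j : Int), j ∈ hitIdxs p xs i →
      i ≤ j ∧ j < i + (xs.length : Int) := by
  intro xs
  induction xs with
  | nil => intro i j h; simp [hitIdxs] at h
  | cons x rest ih =>
    intro i j h
    simp only [hitIdxs] at h
    split at h
    · rcases List.mem_cons.mp h with rfl | h
      · simp only [List.length_cons]; push_cast; omega
      · have := ih (i + 1) j h; simp at this ⊢; omega
    · have := ih (i + 1) j h; simp at this ⊢; omega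

theorem hitIdxs_append (p : List String) :
    ∀ (xs ys : List String) (i : Int),
      hitIdxs p (xs ++ ys) i = hitIdxs p xs i ++ hitIdxs p ys (i + (xs.length : Int)) := by
  intro xs
  induction xs with
  | nil => intro ys i; simp [hitIdxs]
  | cons x rest ih =>
    intro ys i
    simp only [List.cons_append, hitIdxs, ih, List.length_cons]
    have h : i + 1 + (rest.length : Int) = i + ((rest.length + 1 : Nat) : Int) := by
      push_cast; ring
    split
    · rw [h]; simp [List.cons_append]
    · rw [h]

-- head structure of hitIdxs via findIdx?
theorem hitIdxs_head (p : List String) :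
    ∀ (xs : List String) (i : Int),
      hitIdxs p xs i =
        match xs.findIdx? (lineHits p) with
        | none => []
        | some k => (i + (k : Int)) :: hitIdxs p (xs.drop (k + 1)) (i + (k : Int) + 1) := by
  intro xs
  induction xs with
  | nil => intro i; simp [hitIdxs]
  | cons x rest ih =>
    intro i
    by_cases hx : lineHits p x = true
    · simp [hitIdxs, hx, List.findIdx?_cons]
    · rw [Bool.not_eq_true] at hx
      simp only [hitIdxs, hx, if_neg (Bool.false_ne_true), List.findIdx?_cons,
        ih (i + 1)]
      cases hf : rest.findIdx? (lineHits p) with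
      | none => rfl
      | some k =>
        simp only [Option.map_some, List.drop_succ_cons]
        have h : i + 1 + (k : Int) = i + ((k + 1 : Nat) : Int) := by push_cast; ring
        rw [h]

-- foldl min over a list everywhere ≥ a stays a
theorem foldl_min_of_le (a : Int) :
    ∀ (t : List Int), (∀ b ∈ t, a ≤ b) → t.foldl min a = a := by
  intro t
  induction t generalizing a with
  | nil => intro _; rfl
  | cons b t ih =>
    intro h
    have : min a b = a := min_eq_left (h b (by simp))
    simp only [List.foldl_cons, this]
    exact ih a (fun c hc => h c (by simp [hc]))

-- A = the two-findIdx? characterisation (on which B is then shown to agree).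
-- Phase 2: once start_idx = s ≠ -1 is set, the loop returns (s, i + k) for the first
-- stop line at relative position k, or (s, n) if none.
theorem findSectionGoA_phase2 (hp sp : List String) (n : Int) (s : Int) (hs : s ≠ -1) :
    ∀ (xs : List String) (i : Int),
      findSectionGoA hp sp n xs i s =
        match xs.findIdx? (lineHits sp) with
        | none => (s, n)
        | some k => (s, i + (k : Int)) := by
  intro xs
  have hb : (s == -1) = false := by simp [hs]
  induction xs with
  | nil => intro i; simp [findSectionGoA, hb]
  | cons x rest ih =>
    intro i
    by_cases hq : lineHits sp x = true
    · simp [findSectionGoA, List.findIdx?_cons, hb, hq]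
      exact fun h => absurd h hs
    · rw [Bool.not_eq_true] at hq
      simp only [findSectionGoA, List.findIdx?_cons, hb, hq, Bool.false_and,
        Bool.and_false, if_neg (Bool.false_ne_true), ih]
      cases hfind : rest.findIdx? (lineHits sp) with
      | none => rfl
      | some k => simp; omega

-- Phase 1: while start_idx = -1, the loop (current index i ≥ 0) returns A's final
-- answer, characterised via the two findIdx? searches.
theorem findSectionGoA_phase1 (hp sp : List String) (n : Int) :
    ∀ (xs : List String) (i : Int), 0 ≤ i →
      findSectionGoA hp sp n xs i (-1) =
        match xs.findIdx? (lineHits hp) with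
        | none => (0, n)
        | some k =>
          match (xs.drop (k + 1)).findIdx? (lineHits sp) with
          | none => (i + (k : Int), n)
          | some e => (i + (k : Int), i + (k : Int) + 1 + (e : Int)) := by
  intro xs
  induction xs with
  | nil => intro i _; simp [findSectionGoA]
  | cons x rest ih =>
    intro i hi
    by_cases hh : lineHits hp x = true
    · simp only [findSectionGoA, List.findIdx?_cons, hh, Bool.and_true]
      rw [findSectionGoA_phase2 hp sp n i (by omega) rest (i + 1)]
      simp only [beq_self_eq_true, List.drop_succ_cons]
      cases hfind : rest.findIdx? (lineHits sp) with
      | none => simp [hfind]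
      | some e => simp [hfind]
    · rw [Bool.not_eq_true] at hh
      simp only [findSectionGoA, List.findIdx?_cons, hh, Bool.and_false,
        if_neg (Bool.false_ne_true), bne_self_eq_false, Bool.false_and,
        ih (i + 1) (by omega)]
      cases hfind : rest.findIdx? (lineHits hp) with
      | none => rfl
      | some k =>
        simp only [Option.map_some, List.drop_succ_cons]
        cases hfind2 : (rest.drop (k + 1)).findIdx? (lineHits sp) with
        | none => simp; omega
        | some e => simp; omega

-- the filtered stop-index list equals the stop indices of the suffix after s
theorem filtered_stops (sp : List String) (lines : List String) (s : Nat)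
    (hs : s < lines.length) :
    (hitIdxs sp lines 0).filter (fun j => decide ((s : Int) < j)) =
      hitIdxs sp (lines.drop (s + 1)) ((s : Int) + 1) := by
  conv_lhs => rw [← List.take_append_drop (s + 1) lines]
  rw [hitIdxs_append]
  rw [List.filter_append]
  have hlen : (lines.take (s + 1)).length = s + 1 := by
    rw [List.length_take]; omega
  have h1 : (hitIdxs sp (lines.take (s + 1)) 0).filter (fun j => decide ((s : Int) < j)) = [] := by
    rw [List.filter_eq_nil_iff]
    intro j hj
    have := hitIdxs_mem_bounds sp _ 0 j hj
    rw [hlen] at this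
    simp; omega
  have h2 : (hitIdxs sp (lines.drop (s + 1)) (0 + ((lines.take (s + 1)).length : Int))).filter
      (fun j => decide ((s : Int) < j)) = hitIdxs sp (lines.drop (s + 1)) ((s : Int) + 1) := by
    rw [hlen]
    have heq : (0 : Int) + ((s + 1 : Nat) : Int) = (s : Int) + 1 := by push_cast; ring
    rw [heq, List.filter_eq_self]
    intro j hj
    have := hitIdxs_mem_bounds sp _ ((s : Int) + 1) j hj
    simp; omega
  rw [h1, h2, List.nil_append]

-- ===== VERDICT (by name: the statement is the Claim_ definition above) =====
theorem find_section_range_spec : Claim_equal_find_section_range := by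
  intro lines hp sp _
  unfold Spec_find_section_range find_section_range find_section_range_alt
  rw [findSectionGoA_phase1 hp sp (lines.length : Int) lines 0 le_rfl]
  rw [hitIdxs_head hp lines 0]
  cases hfind : lines.findIdx? (lineHits hp) with
  | none => rfl
  | some k =>
    have hk : k < lines.length := by
      have := List.findIdx?_eq_some_iff_findIdx_eq.mp hfind
      exact this.1
    simp only [zero_add]
    rw [filtered_stops sp lines k hk]
    rw [hitIdxs_head sp (lines.drop (k + 1)) ((k : Int) + 1)]
    cases hfind2 : (lines.drop (k + 1)).findIdx? (lineHits sp) with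
    | none => simp [PySem.List.min?]
    | some e =>
      simp only []
      have hmin : PySem.List.min? (((k : Int) + 1 + (e : Int)) ::
          hitIdxs sp ((lines.drop (k + 1)).drop (e + 1)) ((k : Int) + 1 + (e : Int) + 1))
          (fun x => x) = some ((k : Int) + 1 + (e : Int)) := by
        rw [PySem.List.min?_id_cons]
        congr 1
        apply foldl_min_of_le
        intro b hb
        have := hitIdxs_mem_bounds sp _ _ b hb
        omega
      rw [hmin]
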